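-- pv_equiv track=rewrite | github.com/marioernestovaldes/LAMPrEY | app/dashboards/dashboards/dashboard/protein_intensity.py | _thin_ticks
-- ===== SOURCE A (Python) =====
-- def _thin_ticks(tick_vals, tick_text, max_labels=15):
--     """Reduce tick density so labels are readable at any sample count.
--
--     Shows at most *max_labels* evenly-spaced labels, always keeping
--     the first and last tick visible.
--     """
--     n = len(tick_vals)
--     if n <= max_labels:
--         return tick_vals, tick_text
--     step = max(1, n // max_labels)
--     keep = set(range(0, n, step))
--     keep.add(n - 1)
--     return (
--         [v for i, v in enumerate(tick_vals) if i in keep],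
--         [t for i, t in enumerate(tick_text) if i in keep],
--     )
-- ===== SOURCE B (Python) =====
-- def _pick(lst, idx):
--     return [lst[i] for i in idx if i < len(lst)]
--
--
-- def _thin_ticks(tick_vals, tick_text, max_labels=15):
--     """Reduce tick density so labels are readable at any sample count.
--
--     Builds the list of kept indices directly (every step-th index, plus
--     the last index when it is not already on the grid) instead of
--     filtering every element through a membership test.
--     """
--     n = len(tick_vals)
--     if n <= max_labels:
--         return tick_vals, tick_text
--     step = max(1, n // max_labels)
--     idx = list(range(0, n, step))
--     if (n - 1) % step:
--         idx.append(n - 1)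
--     return _pick(tick_vals, idx), _pick(tick_text, idx)
-- ===== Notes on version B (the rewrite author's own statement) =====
-- stated objective: simpler
-- what changed: B builds the kept index list directly (every step-th index plus the last index when it is off the grid) and picks those positions, instead of A's keep-set plus two full enumerate-and-filter passes with a membership test on every element.
import Mathlib
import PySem

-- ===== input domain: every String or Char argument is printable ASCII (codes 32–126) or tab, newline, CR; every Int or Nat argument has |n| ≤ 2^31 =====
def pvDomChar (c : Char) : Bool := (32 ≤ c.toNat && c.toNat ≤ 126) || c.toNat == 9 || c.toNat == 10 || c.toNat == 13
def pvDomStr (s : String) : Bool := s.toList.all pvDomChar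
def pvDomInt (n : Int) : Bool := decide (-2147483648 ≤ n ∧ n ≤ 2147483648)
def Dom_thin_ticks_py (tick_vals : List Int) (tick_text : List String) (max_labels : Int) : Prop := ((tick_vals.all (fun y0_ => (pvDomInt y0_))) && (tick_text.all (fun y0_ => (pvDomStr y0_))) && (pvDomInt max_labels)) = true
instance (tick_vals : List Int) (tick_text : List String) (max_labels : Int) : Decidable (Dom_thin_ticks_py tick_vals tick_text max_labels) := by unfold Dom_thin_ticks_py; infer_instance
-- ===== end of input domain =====

-- B replaces A's keep-set + full enumerate-filter passes by building the kept index list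
-- directly and picking those positions (objective: simpler).

-- ===== PORT A =====
def thin_ticks_py (tick_vals : List Int) (tick_text : List String) (max_labels : Int) : List Int × List String :=
  let n : Int := tick_vals.length
  if n ≤ max_labels then (tick_vals, tick_text)
  else
    let step : Int := max 1 (PySem.Int.floordiv n max_labels)
    let keep : PySem.Set Int := (PySem.Set.ofList (PySem.List.pyRange 0 n step)).add (n - 1)
    ((PySem.List.enumerate tick_vals).filterMap (fun p => if keep.contains p.1 then some p.2 else none),
     (PySem.List.enumerate tick_text).filterMap (fun p => if keep.contains p.1 then some p.2 else none))

-- ===== PORT B =====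
-- port of Source B's helper _pick: [lst[i] for i in idx if i < len(lst)]
def pvPick {α : Type} (lst : List α) (idx : List Int) : List α :=
  idx.filterMap (fun i => if i < (lst.length : Int) then PySem.List.pyGet? lst i else none)

def thin_ticks_py_alt (tick_vals : List Int) (tick_text : List String) (max_labels : Int) : List Int × List String :=
  let n : Int := tick_vals.length
  if n ≤ max_labels then (tick_vals, tick_text)
  else
    let step : Int := max 1 (PySem.Int.floordiv n max_labels)
    let idx0 : List Int := PySem.List.pyRange 0 n step
    let idx : List Int := if PySem.Int.mod (n - 1) step ≠ 0 then idx0 ++ [n - 1] else idx0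
    (pvPick tick_vals idx, pvPick tick_text idx)

-- ===== PRECONDITION & SPEC =====
-- Pre_ excludes exactly the inputs where Python raises ZeroDivisionError in `n // max_labels`:
-- max_labels = 0 with a non-empty tick_vals (both A and B raise there).
def Pre_thin_ticks_py (tick_vals : List Int) (tick_text : List String) (max_labels : Int) : Prop :=
  max_labels ≠ 0 ∨ tick_vals = []
instance (tick_vals : List Int) (tick_text : List String) (max_labels : Int) : Decidable (Pre_thin_ticks_py tick_vals tick_text max_labels) := by unfold Pre_thin_ticks_py; infer_instance

def pvWitness_thin_ticks_py : List Int × List String × Int := ([10, 20, 30, 40, 50], ["a", "b", "c", "d", "e"], 2)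

def Spec_thin_ticks_py (tick_vals : List Int) (tick_text : List String) (max_labels : Int) (out : List Int × List String) : Prop := out = thin_ticks_py_alt tick_vals tick_text max_labels
instance (tick_vals : List Int) (tick_text : List String) (max_labels : Int) (out : List Int × List String) : Decidable (Spec_thin_ticks_py tick_vals tick_text max_labels out) := by unfold Spec_thin_ticks_py; infer_instance

-- ===== CLAIM (what is proved, stated in full; the proofs are below) =====
def Claim_equal_thin_ticks_py : Prop := ∀ (tick_vals : List Int) (tick_text : List String) (max_labels : Int), Dom_thin_ticks_py tick_vals tick_text max_labels → Pre_thin_ticks_py tick_vals tick_text max_labels → Spec_thin_ticks_py tick_vals tick_text max_labels (thin_ticks_py tick_vals tick_text max_labels)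

-- ===== LEMMAS AND PROOFS =====

-- Two strictly increasing integer lists with the same members are equal.
theorem pvEqOfPairwiseLt (as : List Int) : ∀ (bs : List Int), as.Pairwise (· < ·) → bs.Pairwise (· < ·) →
    (∀ x, x ∈ as ↔ x ∈ bs) → as = bs := by
  induction as with
  | nil =>
    intro bs _ _ h
    cases bs with
    | nil => rfl
    | cons b bs => exact absurd ((h b).mpr (List.mem_cons_self)) (by simp)
  | cons a as ih =>
    intro bs ha hb h
    cases bs with
    | nil => exact absurd ((h a).mp List.mem_cons_self) (by simp)
    | cons b bs =>
      have hab : a = b := by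
        rcases List.mem_cons.mp ((h a).mp List.mem_cons_self) with h1 | h1
        · exact h1
        · rcases List.mem_cons.mp ((h b).mpr List.mem_cons_self) with h2 | h2
          · exact h2.symm
          · have := (List.pairwise_cons.mp ha).1 b h2
            have := (List.pairwise_cons.mp hb).1 a h1
            omega
      subst hab
      have htail : ∀ x, x ∈ as ↔ x ∈ bs := by
        intro x
        constructor
        · intro hx
          have hax := (List.pairwise_cons.mp ha).1 x hx
          rcases List.mem_cons.mp ((h x).mp (List.mem_cons_of_mem _ hx)) with h1 | h1
          · omega
          · exact h1
        · intro hx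
          have hax := (List.pairwise_cons.mp hb).1 x hx
          rcases List.mem_cons.mp ((h x).mpr (List.mem_cons_of_mem _ hx)) with h1 | h1
          · omega
          · exact h1
      rw [ih bs (List.pairwise_cons.mp ha).2 (List.pairwise_cons.mp hb).2 htail]

-- A's enumerate-and-filter pass over one list equals B's pick over the sorted kept-index list.
theorem pvPick_eq {α : Type} [Inhabited α] (lst : List α) (idx : List Int) (P : Int → Bool)
    (hpw : idx.Pairwise (· < ·)) (h0 : ∀ i ∈ idx, 0 ≤ i)
    (hP : ∀ i : Int, 0 ≤ i → (P i = true ↔ i ∈ idx)) :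
    (PySem.List.enumerate lst).filterMap (fun p => if P p.1 then some p.2 else none)
      = pvPick lst idx := by
  rw [PySem.List.enumerate_eq_map_pyRange lst default, List.filterMap_map]
  have hL : PySem.List.len lst = (lst.length : Int) := by simp [PySem.List.len]
  rw [hL]
  -- rewrite each kept entry to pyGet? on the range side
  have h1 : (PySem.List.pyRange 0 (lst.length : Int) 1).filterMap
      (fun j => if P j then some (PySem.List.pyGetD lst j default) else none)
      = (PySem.List.pyRange 0 (lst.length : Int) 1).filterMap
      (fun j => if P j then PySem.List.pyGet? lst j else none) := by
    apply List.filterMap_congr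
    intro j hj
    have hm := (PySem.List.mem_pyRange_one (a := 0) (b := (lst.length : Int)) (x := j)).mp hj
    have hget : PySem.List.pyGet? lst j = some (PySem.List.pyGetD lst j default) := by
      rw [PySem.List.pyGet?_of_nonneg lst hm.1, PySem.List.pyGetD_of_nonneg lst default hm.1]
      have hlt : j.toNat < lst.length := by omega
      simp [List.getElem?_eq_getElem hlt, List.getD]
    rw [hget]
  have h2 : (PySem.List.pyRange 0 (lst.length : Int) 1).filter (fun j => P j)
      = idx.filter (fun i => decide (i < (lst.length : Int))) := by
    apply pvEqOfPairwiseLt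
    · exact (PySem.List.pairwise_lt_pyRange_one 0 (lst.length : Int)).filter _
    · exact hpw.filter _
    · intro x
      simp only [List.mem_filter, PySem.List.mem_pyRange_one, decide_eq_true_eq]
      constructor
      · rintro ⟨⟨hx0, hxl⟩, hPx⟩
        exact ⟨(hP x hx0).mp hPx, hxl⟩
      · rintro ⟨hx, hxl⟩
        exact ⟨⟨h0 x hx, hxl⟩, (hP x (h0 x hx)).mpr hx⟩
  calc (PySem.List.pyRange 0 (lst.length : Int) 1).filterMap
        ((fun p => if P p.1 then some p.2 else none) ∘ fun j => (j, PySem.List.pyGetD lst j default))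
      = (PySem.List.pyRange 0 (lst.length : Int) 1).filterMap
        (fun j => if P j then some (PySem.List.pyGetD lst j default) else none) := by
        apply List.filterMap_congr; intro j _; rfl
    _ = (PySem.List.pyRange 0 (lst.length : Int) 1).filterMap
        (fun j => if P j then PySem.List.pyGet? lst j else none) := h1
    _ = ((PySem.List.pyRange 0 (lst.length : Int) 1).filter (fun j => P j)).filterMap
        (fun j => PySem.List.pyGet? lst j) := (List.filterMap_filter).symm
    _ = (idx.filter (fun i => decide (i < (lst.length : Int)))).filterMap
        (fun j => PySem.List.pyGet? lst j) := by rw [h2]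
    _ = pvPick lst idx := by
        rw [List.filterMap_filter]
        unfold pvPick
        apply List.filterMap_congr
        intro i _
        by_cases hc : i < (lst.length : Int) <;> simp [hc]

-- ===== VERDICT (by name: the statement is the Claim_ definition above) =====
theorem thin_ticks_py_spec : Claim_equal_thin_ticks_py := by
  intro tick_vals tick_text max_labels _ hpre
  unfold Spec_thin_ticks_py thin_ticks_py thin_ticks_py_alt
  by_cases hb : (tick_vals.length : Int) ≤ max_labels
  · simp only [hb, if_true]
  · simp only [hb, if_false]
    set n : Int := (tick_vals.length : Int) with hn
    set step : Int := max 1 (PySem.Int.floordiv n max_labels) with hstep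
    have hs : 0 < step := by simp [hstep]
    set r : List Int := PySem.List.pyRange 0 n step with hr
    set idx : List Int := if PySem.Int.mod (n - 1) step ≠ 0 then r ++ [n - 1] else r with hidx
    have hmemr : ∀ x : Int, x ∈ r ↔ 0 ≤ x ∧ x < n ∧ step ∣ x := by
      intro x
      rw [hr, PySem.List.mem_pyRange_iff_of_pos hs x]
      simp
    have hrpw : r.Pairwise (· < ·) := by
      rw [hr, PySem.List.pyRange_of_pos 0 n hs]
      refine List.Pairwise.map _ ?_ List.pairwise_lt_range
      intro a b hab
      have : step * (a : Int) < step * (b : Int) := by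
        apply mul_lt_mul_of_pos_left _ hs
        exact_mod_cast hab
      omega
    have hpw : idx.Pairwise (· < ·) := by
      rw [hidx]
      split_ifs with hm
      · rw [List.pairwise_append]
        refine ⟨hrpw, List.pairwise_singleton _ _, ?_⟩
        intro x hx y hy
        have hy' : y = n - 1 := by simpa using hy
        have hxm := (hmemr x).mp hx
        have hxne : x ≠ n - 1 := by
          intro hxe
          exact hm ((PySem.Int.mod_eq_zero_iff_dvd (n - 1) step).mpr (hxe ▸ hxm.2.2))
        omega
      · exact hrpw
    have h0 : ∀ i ∈ idx, 0 ≤ i := by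
      intro i hi
      rw [hidx] at hi
      split_ifs at hi with hm
      · rcases List.mem_append.mp hi with h | h
        · exact ((hmemr i).mp h).1
        · -- i = n - 1; n = 0 is impossible here since then step = 1 and (n-1) % step = 0
          have hie : i = n - 1 := by simpa using h
          have hn0 : 0 ≤ n := by rw [hn]; positivity
          rcases lt_or_eq_of_le hn0 with hlt | heq
          · omega
          · exfalso
            have hml : max_labels ≠ 0 := by
              rcases hpre with h | h
              · exact h
              · intro he; apply hb; rw [hn, h, he]; simp
            have hfd : PySem.Int.floordiv n max_labels = 0 := by
              rw [← heq]
              simp [PySem.Int.floordiv]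
            have hstep1 : step = 1 := by rw [hstep, hfd]; rfl
            apply hm
            rw [hstep1, ← heq]
            decide
      · exact ((hmemr i).mp hi).1
    have hP : ∀ i : Int, 0 ≤ i →
        ((((PySem.Set.ofList r).add (n - 1)).contains i) = true ↔ i ∈ idx) := by
      intro i hi0
      rw [PySem.Set.contains_iff, PySem.Set.mem_add, PySem.Set.mem_ofList]
      rw [hidx]
      split_ifs with hm
      · simp [List.mem_append]
      · rw [not_not] at hm
        constructor
        · rintro (h | h)
          · exact h
          · -- i = n - 1 and (n-1) % step = 0, so n - 1 ∈ r
            subst h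
            have hdvd := (PySem.Int.mod_eq_zero_iff_dvd (n - 1) step).mp hm
            exact (hmemr (n - 1)).mpr ⟨hi0, by omega, hdvd⟩
        · intro h; exact Or.inl h
    exact Prod.ext
      (pvPick_eq tick_vals idx _ hpw h0 hP)
      (pvPick_eq tick_text idx _ hpw h0 hP)
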